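-- pv_equiv track=rewrite | github.com/jcortega/wumpus | src/models/agent/move_planning_agent.py | _calculate_next_actions
-- ===== SOURCE A (Python) =====
-- def _calculate_next_actions(path):
--     next_actions = []
--
--     node1 = path.pop(0)
--     node2 = None
--     while path:
--         node2 = path.pop(0)
--         if node1[2] == node2[2]:
--             next_actions.append('f')
--         elif node1[2] == 'down':
--             if node2[2] == 'left':
--                 next_actions.append('r')
--             elif node2[2] == 'right':
--                 next_actions.append('l')
--         elif node1[2] == 'up':
--             if node2[2] == 'left':
--                 next_actions.append('l')
--             elif node2[2] == 'right':
--                 next_actions.append('r')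
--         elif node1[2] == 'left':
--             if node2[2] == 'down':
--                 next_actions.append('l')
--             elif node2[2] == 'up':
--                 next_actions.append('r')
--         elif node1[2] == 'right':
--             if node2[2] == 'down':
--                 next_actions.append('r')
--             elif node2[2] == 'up':
--                 next_actions.append('l')
--         node1 = node2
--     return next_actions
-- ===== SOURCE B (Python) =====
-- _ANG = {'up': 0, 'right': 1, 'down': 2, 'left': 3}
-- _TURN = {1: ['r'], 3: ['l']}
--
--
-- def _step(node1, node2):
--     if node1[2] == node2[2]:
--         return ['f']
--     if node1[2] in _ANG and node2[2] in _ANG: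
--         return _TURN.get((_ANG[node2[2]] - _ANG[node1[2]]) % 4, [])
--     return []
--
--
-- def _calculate_next_actions(path):
--     return [act for a, b in zip(path, path[1:]) for act in _step(a, b)]
-- ===== Notes on version B (the rewrite author's own statement) =====
-- stated objective: simpler
-- what changed: Replaces the while/pop(0) loop with its 9-branch orientation case ladder by a single pairwise comprehension over zip(path, path[1:]) that encodes orientations as angles in a dict and decides the turn by closed-form modular arithmetic ((angle2-angle1) % 4); B does not mutate path (return-value equivalence only) and returns [] on the empty path where A raises IndexError.
-- outside the precondition, e.g. on _calculate_next_actions([]): A raises IndexError, B returns []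
import Mathlib
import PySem

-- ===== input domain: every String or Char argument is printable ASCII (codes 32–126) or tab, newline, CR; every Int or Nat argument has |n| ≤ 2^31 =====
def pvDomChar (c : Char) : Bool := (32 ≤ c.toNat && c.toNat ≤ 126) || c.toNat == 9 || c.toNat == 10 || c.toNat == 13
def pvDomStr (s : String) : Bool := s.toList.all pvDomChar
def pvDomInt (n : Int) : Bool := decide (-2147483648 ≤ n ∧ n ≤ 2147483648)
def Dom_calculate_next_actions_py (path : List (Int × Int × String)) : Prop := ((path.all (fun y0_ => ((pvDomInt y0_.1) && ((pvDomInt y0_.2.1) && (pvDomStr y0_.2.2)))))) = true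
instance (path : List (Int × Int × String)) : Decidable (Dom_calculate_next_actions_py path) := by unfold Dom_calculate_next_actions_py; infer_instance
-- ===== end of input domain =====

-- B replaces A's while/pop(0) loop with nested case ladder by a pairwise flat-map using an
-- orientation→angle dict and (angle2-angle1) % 4 (objective: simpler). A mutates path (empties
-- it) while B does not: the equivalence proved here is about the RETURN value only.

-- ===== PORT A =====
-- while loop of A: state = (accumulated next_actions, node1, remaining path)
def pvLoopA (acc : List String) (node1 : Int × Int × String) :
    List (Int × Int × String) → List String
  | [] => acc
  | node2 :: rest =>
      let acc' :=
        if node1.2.2 = node2.2.2 then acc ++ ["f"]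
        else if node1.2.2 = "down" then
          if node2.2.2 = "left" then acc ++ ["r"]
          else if node2.2.2 = "right" then acc ++ ["l"]
          else acc
        else if node1.2.2 = "up" then
          if node2.2.2 = "left" then acc ++ ["l"]
          else if node2.2.2 = "right" then acc ++ ["r"]
          else acc
        else if node1.2.2 = "left" then
          if node2.2.2 = "down" then acc ++ ["l"]
          else if node2.2.2 = "up" then acc ++ ["r"]
          else acc
        else if node1.2.2 = "right" then
          if node2.2.2 = "down" then acc ++ ["r"]
          else if node2.2.2 = "up" then acc ++ ["l"]
          else acc
        else acc
      pvLoopA acc' node2 rest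

def calculate_next_actions_py (path : List (Int × Int × String)) : List String :=
  match path with
  | [] => []          -- unreachable under Pre_: path.pop(0) raises IndexError in Python
  | node1 :: rest => pvLoopA [] node1 rest

-- ===== PORT B =====
def pvAng : PySem.Dict String Int :=
  PySem.Dict.mk [("up", 0), ("right", 1), ("down", 2), ("left", 3)]

def pvTurn : PySem.Dict Int (List String) :=
  PySem.Dict.mk [(1, ["r"]), (3, ["l"])]

def pvStepB (a b : Int × Int × String) : List String :=
  if a.2.2 = b.2.2 then ["f"]
  else
    match PySem.Dict.get? pvAng a.2.2, PySem.Dict.get? pvAng b.2.2 with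
    | some x, some y => PySem.Dict.getD pvTurn (PySem.Int.mod (y - x) 4) []
    | _, _ => []

def calculate_next_actions_py_alt (path : List (Int × Int × String)) : List String :=
  (path.zip (path.drop 1)).flatMap (fun p => pvStepB p.1 p.2)

-- ===== PRECONDITION & SPEC =====
-- Pre_ excludes only the empty path, on which Python A raises IndexError (path.pop(0)).
def Pre_calculate_next_actions_py (path : List (Int × Int × String)) : Prop := path ≠ []
instance (path : List (Int × Int × String)) : Decidable (Pre_calculate_next_actions_py path) := by
  unfold Pre_calculate_next_actions_py; infer_instance

def pvWitness_calculate_next_actions_py : (List (Int × Int × String)) :=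
  [(0, 0, "up"), (0, 1, "up"), (0, 1, "right")]

def Spec_calculate_next_actions_py (path : List (Int × Int × String)) (out : List String) : Prop :=
  out = calculate_next_actions_py_alt path
instance (path : List (Int × Int × String)) (out : List String) :
    Decidable (Spec_calculate_next_actions_py path out) := by
  unfold Spec_calculate_next_actions_py; infer_instance

-- ===== CLAIM (what is proved, stated in full; the proofs are below) =====
def Claim_equal_calculate_next_actions_py : Prop :=
  ∀ (path : List (Int × Int × String)), Dom_calculate_next_actions_py path →
    Pre_calculate_next_actions_py path →
    Spec_calculate_next_actions_py path (calculate_next_actions_py path)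

-- ===== LEMMAS AND PROOFS =====

-- the orientation dict as an if-chain over the four orientation strings
theorem pvAng_get (s : String) :
    PySem.Dict.get? pvAng s =
      if s = "up" then some 0 else if s = "right" then some 1
      else if s = "down" then some 2 else if s = "left" then some 3 else none := by
  simp only [pvAng, PySem.Dict.get?_mk_cons]
  split_ifs <;> simp_all [PySem.Dict.get?, List.find?]

-- per-pair agreement: A's case ladder step equals acc ++ B's modular-arithmetic step
theorem pvStep_eq (acc : List String) (n1 n2 : Int × Int × String) :
    (if n1.2.2 = n2.2.2 then acc ++ ["f"]
     else if n1.2.2 = "down" then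
       if n2.2.2 = "left" then acc ++ ["r"]
       else if n2.2.2 = "right" then acc ++ ["l"]
       else acc
     else if n1.2.2 = "up" then
       if n2.2.2 = "left" then acc ++ ["l"]
       else if n2.2.2 = "right" then acc ++ ["r"]
       else acc
     else if n1.2.2 = "left" then
       if n2.2.2 = "down" then acc ++ ["l"]
       else if n2.2.2 = "up" then acc ++ ["r"]
       else acc
     else if n1.2.2 = "right" then
       if n2.2.2 = "down" then acc ++ ["r"]
       else if n2.2.2 = "up" then acc ++ ["l"]
       else acc
     else acc) = acc ++ pvStepB n1 n2 := by
  unfold pvStepB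
  rw [pvAng_get n1.2.2, pvAng_get n2.2.2]
  by_cases h12 : n1.2.2 = n2.2.2
  · simp [h12]
  · by_cases h1d : n1.2.2 = "down" <;> by_cases h1u : n1.2.2 = "up" <;>
      by_cases h1l : n1.2.2 = "left" <;> by_cases h1r : n1.2.2 = "right" <;>
    by_cases h2d : n2.2.2 = "down" <;> by_cases h2u : n2.2.2 = "up" <;>
      by_cases h2l : n2.2.2 = "left" <;> by_cases h2r : n2.2.2 = "right" <;>
    simp_all [pvTurn, PySem.Dict.getD, PySem.Dict.get?, List.find?, PySem.Int.mod, Int.fmod] <;>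
    decide

theorem pvLoopA_eq (rest : List (Int × Int × String)) :
    ∀ (n1 : Int × Int × String) (acc : List String),
      pvLoopA acc n1 rest =
        acc ++ ((n1 :: rest).zip rest).flatMap (fun p => pvStepB p.1 p.2) := by
  induction rest with
  | nil => intro n1 acc; simp [pvLoopA]
  | cons n2 rest ih =>
      intro n1 acc
      show pvLoopA _ n2 rest = _
      rw [ih n2 _]
      rw [pvStep_eq acc n1 n2]
      simp

-- ===== VERDICT (by name: the statement is the Claim_ definition above) =====
theorem calculate_next_actions_py_spec : Claim_equal_calculate_next_actions_py := by
  intro path _ hpre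
  unfold Spec_calculate_next_actions_py
  match path with
  | [] => exact absurd rfl hpre
  | n1 :: rest =>
      show pvLoopA [] n1 rest = calculate_next_actions_py_alt (n1 :: rest)
      rw [pvLoopA_eq rest n1 []]
      simp [calculate_next_actions_py_alt]
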